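-- pv_equiv track=rewrite | github.com/zhpn1024/ribotish | src/zbio/tools.py | range_to_bins
-- ===== SOURCE A (Python) =====
-- def range_to_bins(start, end):
--   binOffsets = [512+64+8+1, 64+8+1, 8+1, 1, 0]
--   binFirstShift = 17    # How much to shift to get to finest bin.
--   binNextShift = 3     # How much to shift to get to next larger bin.
--   startBin = start
--   endBin = end - 1
--   startBin >>= binFirstShift
--   endBin >>= binFirstShift
--   for bo in binOffsets:
--     if startBin == endBin: return bo + startBin
--     startBin >>= binNextShift
--     endBin >>= binNextShift
-- ===== SOURCE B (Python) =====
-- def range_to_bins(start, end):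
--   binOffsets = [512+64+8+1, 64+8+1, 8+1, 1, 0]
--   startBin = start >> 17
--   endBin = (end - 1) >> 17
--   # smallest level i with startBin >> (3*i) == endBin >> (3*i), as a closed form
--   i = ((startBin ^ endBin).bit_length() + 2) // 3
--   if i <= 4:
--     return binOffsets[i] + (startBin >> (3 * i))
--   return None
-- ===== Notes on version B (the rewrite author's own statement) =====
-- stated objective: alternative
-- what changed: Replaces A's destructive shift-and-compare loop over the offsets table by a closed form: the bin level is ceil(bit_length(startBin XOR endBin)/3), then the table is indexed directly.
-- outside the precondition, e.g. on range_to_bins(0, 0): A returns None, B returns 73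
import Mathlib
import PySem

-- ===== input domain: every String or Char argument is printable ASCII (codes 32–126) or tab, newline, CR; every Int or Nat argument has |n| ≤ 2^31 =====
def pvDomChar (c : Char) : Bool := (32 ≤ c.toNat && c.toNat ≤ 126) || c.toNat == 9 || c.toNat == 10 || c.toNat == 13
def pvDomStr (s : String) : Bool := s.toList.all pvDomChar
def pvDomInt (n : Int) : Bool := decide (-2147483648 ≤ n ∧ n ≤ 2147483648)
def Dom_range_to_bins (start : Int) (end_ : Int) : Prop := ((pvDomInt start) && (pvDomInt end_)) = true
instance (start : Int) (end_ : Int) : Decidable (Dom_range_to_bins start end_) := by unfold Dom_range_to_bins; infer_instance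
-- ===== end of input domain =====

-- B computes the bin level by a closed form (bit_length of the XOR) instead of A's shift-and-compare loop; alternative decomposition, no speed claim.

-- ===== PORT A =====
-- the for-loop over binOffsets with the mutated (startBin, endBin) state
def rtbLoop : List Int → Int → Int → Int
  | [], _, _ => 0      -- Python falls off the loop and returns None here; excluded by Pre_
  | bo :: rest, s, e => if s = e then bo + s else rtbLoop rest (s >>> (3:Nat)) (e >>> (3:Nat))

def range_to_bins (start : Int) (end_ : Int) : Int :=
  rtbLoop [512+64+8+1, 64+8+1, 8+1, 1, 0] (start >>> (17:Nat)) ((end_ - 1) >>> (17:Nat))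

-- ===== PORT B =====
def range_to_bins_alt (start : Int) (end_ : Int) : Int :=
  let binOffsets : List Int := [512+64+8+1, 64+8+1, 8+1, 1, 0]
  let startBin := start >>> (17:Nat)
  let endBin := (end_ - 1) >>> (17:Nat)
  let i : Nat := (PySem.Int.bitLength (PySem.Int.bxor startBin endBin) + 2) / 3
  if i ≤ 4 then (PySem.List.pyGet? binOffsets (i : Int)).getD 0 + (startBin >>> (3 * i))
  else 0   -- Python returns None here; excluded by Pre_

-- ===== PRECONDITION & SPEC =====
-- Pre_ excludes exactly the inputs on which A's loop finds no level and falls through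
-- returning None (not an int): ranges whose endpoints disagree even in the coarsest bin.
def Pre_range_to_bins (start : Int) (end_ : Int) : Prop :=
  start >>> (29 : Nat) = (end_ - 1) >>> (29 : Nat)
instance (start : Int) (end_ : Int) : Decidable (Pre_range_to_bins start end_) := by
  unfold Pre_range_to_bins; infer_instance
def pvWitness_range_to_bins : Int × Int := (100000, 200000)

def Spec_range_to_bins (start : Int) (end_ : Int) (out : Int) : Prop := out = range_to_bins_alt start end_
instance (start : Int) (end_ : Int) (out : Int) : Decidable (Spec_range_to_bins start end_ out) := by unfold Spec_range_to_bins; infer_instance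

-- ===== CLAIM (what is proved, stated in full; the proofs are below) =====
def Claim_equal_range_to_bins : Prop := ∀ (start : Int) (end_ : Int), Dom_range_to_bins start end_ → Pre_range_to_bins start end_ → Spec_range_to_bins start end_ (range_to_bins start end_)

-- ===== LEMMAS AND PROOFS =====

theorem int_shr_shr (x : Int) (a b : Nat) : (x >>> a) >>> b = x >>> (a + b) := by
  cases x with
  | ofNat m => show Int.ofNat _ = Int.ofNat _ ; simp [Nat.shiftRight_add]
  | negSucc m => show Int.negSucc _ = Int.negSucc _ ; simp [Nat.shiftRight_add]

theorem nat_shr_shr (a x y : Nat) : (a >>> x) >>> y = a >>> (x + y) :=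
  (Nat.shiftRight_add a x y).symm

theorem nat_xor_div_two (a b : Nat) : (a ^^^ b) / 2 = (a / 2) ^^^ (b / 2) := by
  apply Nat.eq_of_testBit_eq
  intro i
  simp [Nat.testBit_div_two, Nat.testBit_xor]

theorem nat_div_pow_eq_iff_xor_lt (k : Nat) : ∀ a b : Nat, (a / 2 ^ k = b / 2 ^ k ↔ a ^^^ b < 2 ^ k) := by
  induction k with
  | zero =>
    intro a b
    simp [Nat.xor_eq_zero_iff]
  | succ k ih =>
    intro a b
    have h2 : (2:Nat) ^ (k+1) = 2 ^ k * 2 := by ring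
    have hdiv : ∀ x : Nat, x / 2 ^ (k+1) = x / 2 / 2 ^ k := by
      intro x
      rw [Nat.div_div_eq_div_mul, h2, Nat.mul_comm]
    rw [hdiv a, hdiv b, ih (a/2) (b/2), ← nat_xor_div_two,
      Nat.div_lt_iff_lt_mul (by norm_num), ← h2]

theorem nat_shr_eq_iff_xor_lt (a b k : Nat) : (a >>> k = b >>> k ↔ a ^^^ b < 2 ^ k) := by
  rw [Nat.shiftRight_eq_div_pow, Nat.shiftRight_eq_div_pow]
  exact nat_div_pow_eq_iff_xor_lt k a b

-- the core argument, abstracted over the embedding Nat → Int (Int.ofNat for both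
-- arguments nonnegative, Int.negSucc for both negative)
theorem rtb_core (emb : Nat → Int)
    (hinj : ∀ x y : Nat, (emb x = emb y) ↔ x = y)
    (hshr : ∀ (m k : Nat), (emb m) >>> k = emb (m >>> k))
    (hxor : ∀ x y : Nat, PySem.Int.bxor (emb x) (emb y) = ((x ^^^ y : Nat) : Int))
    (a b : Nat) (h12 : a ^^^ b < 2 ^ 12) :
    rtbLoop [512+64+8+1, 64+8+1, 8+1, 1, 0] (emb a) (emb b)
      = (if ((PySem.Int.bitLength (PySem.Int.bxor (emb a) (emb b)) + 2) / 3 : Nat) ≤ 4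
          then (PySem.List.pyGet? [512+64+8+1, 64+8+1, 8+1, 1, 0]
                  (((PySem.Int.bitLength (PySem.Int.bxor (emb a) (emb b)) + 2) / 3 : Nat) : Int)).getD 0
               + ((emb a) >>> (3 * ((PySem.Int.bitLength (PySem.Int.bxor (emb a) (emb b)) + 2) / 3 : Nat)))
          else 0) := by
  rw [hxor]
  set n : Nat := a ^^^ b with hn
  set bl : Nat := PySem.Int.bitLength (n : Int) with hbl
  have hup : n < 2 ^ bl := by
    have := PySem.Int.lt_two_pow_bitLength (n : Int)
    simpa [hbl] using this
  have hlow : n ≠ 0 → 2 ^ (bl - 1) ≤ n := by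
    intro h0
    have := PySem.Int.two_pow_bitLength_le (n : Int) (by exact_mod_cast h0)
    simpa [hbl] using this
  have hblpos : n ≠ 0 → 0 < bl := by
    intro h0
    by_contra h
    have hb0 : bl = 0 := by omega
    rw [hb0] at hup
    omega
  -- the level-k loop conditions as bounds on n
  have cond : ∀ k : Nat, (emb (a >>> k) = emb (b >>> k)) ↔ n < 2 ^ k := by
    intro k
    rw [hinj, nat_shr_eq_iff_xor_lt]
  have cond0 : (emb a = emb b) ↔ n < 2 ^ 0 := by
    rw [hinj, pow_zero, Nat.lt_one_iff, hn]
    exact Nat.xor_eq_zero_iff.symm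
  have pow_bound : ∀ {u v : Nat}, 2 ^ u ≤ n → n < 2 ^ v → u < v := by
    intro u v h1 h2
    exact (Nat.pow_lt_pow_iff_right (a := 2) (by norm_num)).mp (lt_of_le_of_lt h1 h2)
  simp only [rtbLoop, hshr, nat_shr_shr, cond0, cond]
  norm_num
  by_cases c0 : n < 1
  · -- level 0: n = 0
    have hn0 : n = 0 := by omega
    have hbl0 : bl = 0 := by rw [hbl, hn0]; simp [PySem.Int.bitLength_zero]
    simp [hn0, hbl0, PySem.List.pyGet?, PySem.List.pyIdx?]
  · have hne : n ≠ 0 := by omega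
    have hlo := hlow hne
    have hpos := hblpos hne
    by_cases c1 : n < 8
    · have hi : (bl + 2) / 3 = 1 := by
        have h1 : bl - 1 < 3 := pow_bound hlo (by simpa using c1)
        omega
      have hi' : ((bl : Int) + 2) / 3 = 1 := by omega
      simp [hne, c1, hi, hi', PySem.List.pyGet?, PySem.List.pyIdx?]
    · have hge1 : 2 ^ 3 ≤ n := by simp only [pow_succ, pow_zero]; omega
      by_cases c2 : n < 64
      · have hi : (bl + 2) / 3 = 2 := by
          have h1 : bl - 1 < 6 := pow_bound hlo (by simpa using c2)
          have h2 : 3 < bl := pow_bound hge1 hup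
          omega
        have hi' : ((bl : Int) + 2) / 3 = 2 := by omega
        simp [hne, c1, c2, hi, hi', PySem.List.pyGet?, PySem.List.pyIdx?]
      · have hge2 : 2 ^ 6 ≤ n := by simp only [pow_succ, pow_zero]; omega
        by_cases c3 : n < 512
        · have hi : (bl + 2) / 3 = 3 := by
            have h1 : bl - 1 < 9 := pow_bound hlo (by simpa using c3)
            have h2 : 6 < bl := pow_bound hge2 hup
            omega
          have hi' : ((bl : Int) + 2) / 3 = 3 := by omega
          simp [hne, c1, c2, c3, hi, hi', PySem.List.pyGet?, PySem.List.pyIdx?]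
        · have hge3 : 2 ^ 9 ≤ n := by simp only [pow_succ, pow_zero]; omega
          have c4 : n < 4096 := by
            have h := h12; simp only [pow_succ, pow_zero] at h; omega
          have hi : (bl + 2) / 3 = 4 := by
            have h1 : bl - 1 < 12 := pow_bound hlo (by simpa using h12)
            have h2 : 9 < bl := pow_bound hge3 hup
            omega
          have hi' : ((bl : Int) + 2) / 3 = 4 := by omega
          simp [hne, c1, c2, c3, c4, hi, hi', PySem.List.pyGet?, PySem.List.pyIdx?]

theorem ofNat_inj_iff (x y : Nat) : (Int.ofNat x = Int.ofNat y) ↔ x = y := by simp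

theorem negSucc_inj_iff (x y : Nat) : (Int.negSucc x = Int.negSucc y) ↔ x = y := by simp

theorem ofNat_shr (m k : Nat) : (Int.ofNat m) >>> k = Int.ofNat (m >>> k) := rfl

theorem negSucc_shr (m k : Nat) : (Int.negSucc m) >>> k = Int.negSucc (m >>> k) := rfl

theorem bxor_negSucc (x y : Nat) :
    PySem.Int.bxor (Int.negSucc x) (Int.negSucc y) = ((x ^^^ y : Nat) : Int) := by
  simp [PySem.Int.bxor]

-- ===== VERDICT (by name: the statement is the Claim_ definition above) =====
theorem range_to_bins_spec : Claim_equal_range_to_bins := by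
  intro start end_ _ hpre
  unfold Spec_range_to_bins range_to_bins range_to_bins_alt
  have hpre' : (start >>> (17:Nat)) >>> (12:Nat) = ((end_ - 1) >>> (17:Nat)) >>> (12:Nat) := by
    rw [int_shr_shr, int_shr_shr]
    exact hpre
  generalize hsb : start >>> (17:Nat) = sb at *
  generalize heb : (end_ - 1) >>> (17:Nat) = eb at *
  cases sb with
  | ofNat a =>
    cases eb with
    | ofNat b =>
      have h12 : a ^^^ b < 2 ^ 12 := by
        rw [ofNat_shr, ofNat_shr, ofNat_inj_iff, nat_shr_eq_iff_xor_lt] at hpre'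
        exact hpre'
      simpa using rtb_core Int.ofNat ofNat_inj_iff ofNat_shr
        (by intro x y; simp [Int.ofNat_eq_natCast]) a b h12
    | negSucc b =>
      exact Int.noConfusion ((ofNat_shr _ _) ▸ (negSucc_shr _ _) ▸ hpre')
  | negSucc a =>
    cases eb with
    | ofNat b =>
      exact Int.noConfusion ((negSucc_shr _ _) ▸ (ofNat_shr _ _) ▸ hpre')
    | negSucc b =>
      have h12 : a ^^^ b < 2 ^ 12 := by
        rw [negSucc_shr, negSucc_shr, negSucc_inj_iff, nat_shr_eq_iff_xor_lt] at hpre'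
        exact hpre'
      simpa using rtb_core Int.negSucc negSucc_inj_iff negSucc_shr bxor_negSucc a b h12
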